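-- pv_equiv track=rewrite | github.com/enzoBrum/competitive-programming | main.py | gen_all
-- ===== SOURCE A (Python) =====
-- def gen_all(num: str) -> list[int]:
--     n = len(num)
--     ret = [0]
--
--     for i, c in enumerate(num):
--         if c == "0":
--             continue
--         if c == "1":
--             for j in range(len(ret)):
--                 ret[j] |= 1 << (n - i - 1)
--         else:
--             limit = len(ret)
--             for j in range(limit):
--                 ret.append(ret[j] | (1 << (n - i - 1)))
--     return ret
-- ===== SOURCE B (Python) =====
-- def gen_all(num: str) -> list[int]:
--     n = len(num)
--     base = 0
--     wilds = []
--     for i, c in enumerate(num):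
--         bit = 1 << (n - i - 1)
--         if c == "1":
--             base |= bit
--         elif c != "0":
--             wilds.append(bit)
--     ret = [base]
--     for b in wilds:
--         ret += [x | b for x in ret]
--     return ret
-- ===== Notes on version B (the rewrite author's own statement) =====
-- stated objective: alternative
-- what changed: B accumulates all fixed one-bits into a single base mask and collects the wildcard bits in one pass, then builds the result list by doubling once per wildcard bit, instead of rewriting or doubling the whole result list while scanning the string.
import Mathlib
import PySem

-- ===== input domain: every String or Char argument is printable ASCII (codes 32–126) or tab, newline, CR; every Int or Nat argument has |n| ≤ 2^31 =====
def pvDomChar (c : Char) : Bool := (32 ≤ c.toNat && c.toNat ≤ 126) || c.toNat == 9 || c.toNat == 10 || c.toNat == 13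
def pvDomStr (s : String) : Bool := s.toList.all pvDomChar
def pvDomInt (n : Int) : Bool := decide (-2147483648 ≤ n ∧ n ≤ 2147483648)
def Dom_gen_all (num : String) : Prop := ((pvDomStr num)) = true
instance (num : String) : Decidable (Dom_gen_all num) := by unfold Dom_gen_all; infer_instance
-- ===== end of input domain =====

-- ===== PORT A =====
-- B folds the fixed one-bits into a single base mask first and doubles the list once per wildcard bit (alternative algorithm; same return value).
def gen_all (num : String) : List Int :=
  let cs := num.toList
  let n : Int := cs.length
  (PySem.List.enumerate cs).foldl (fun ret ic =>
    if ic.2 = '0' then ret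
    else if ic.2 = '1' then
      ret.map (fun x => PySem.Int.bor x ((1 : Int) <<< (n - ic.1 - 1).toNat))
    else
      ret ++ ret.map (fun x => PySem.Int.bor x ((1 : Int) <<< (n - ic.1 - 1).toNat))) [0]

-- ===== PORT B =====
def gen_all_alt (num : String) : List Int :=
  let cs := num.toList
  let n : Int := cs.length
  let base : Int := (PySem.List.enumerate cs).foldl
    (fun b ic => if ic.2 = '1' then PySem.Int.bor b ((1 : Int) <<< (n - ic.1 - 1).toNat) else b) 0
  let wilds : List Int := (PySem.List.enumerate cs).filterMap
    (fun ic => if ic.2 = '0' ∨ ic.2 = '1' then none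
               else some ((1 : Int) <<< (n - ic.1 - 1).toNat))
  wilds.foldl (fun ret b => ret ++ ret.map (fun x => PySem.Int.bor x b)) [base]

-- ===== PRECONDITION & SPEC =====
def Spec_gen_all (num : String) (out : List Int) : Prop := out = gen_all_alt num
instance (num : String) (out : List Int) : Decidable (Spec_gen_all num out) := by unfold Spec_gen_all; infer_instance

-- ===== CLAIM (what is proved, stated in full; the proofs are below) =====
def Claim_equal_gen_all : Prop := ∀ (num : String), Dom_gen_all num → Spec_gen_all num (gen_all num)

-- ===== LEMMAS AND PROOFS =====

-- Nat-level mirror of both programs (every value in either computation is a cast of a Nat).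
def pvBit (n : Int) (ic : Int × Char) : Nat := 1 <<< (n - ic.1 - 1).toNat

def pvStepA (n : Int) (ret : List Nat) (ic : Int × Char) : List Nat :=
  if ic.2 = '0' then ret
  else if ic.2 = '1' then ret.map (fun x => x ||| pvBit n ic)
  else ret ++ ret.map (fun x => x ||| pvBit n ic)

def pvDouble (ret : List Nat) (b : Nat) : List Nat := ret ++ ret.map (fun x => x ||| b)

def pvStepBase (n : Int) (b : Nat) (ic : Int × Char) : Nat :=
  if ic.2 = '1' then b ||| pvBit n ic else b

def pvBase (n : Int) (l : List (Int × Char)) : Nat := l.foldl (pvStepBase n) 0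

def pvWilds (n : Int) (l : List (Int × Char)) : List Nat :=
  l.filterMap (fun ic => if ic.2 = '0' ∨ ic.2 = '1' then none else some (pvBit n ic))

-- Int-level named forms of the two ports' loop bodies.
def pvCast (r : List Nat) : List Int := r.map (fun m : Nat => (m : Int))

def pvStepAI (n : Int) (ret : List Int) (ic : Int × Char) : List Int :=
  if ic.2 = '0' then ret
  else if ic.2 = '1' then ret.map (fun x => PySem.Int.bor x ((1 : Int) <<< (n - ic.1 - 1).toNat))
  else ret ++ ret.map (fun x => PySem.Int.bor x ((1 : Int) <<< (n - ic.1 - 1).toNat))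

def pvStepBaseI (n : Int) (b : Int) (ic : Int × Char) : Int :=
  if ic.2 = '1' then PySem.Int.bor b ((1 : Int) <<< (n - ic.1 - 1).toNat) else b

def pvDoubleI (ret : List Int) (b : Int) : List Int :=
  ret ++ ret.map (fun x => PySem.Int.bor x b)

theorem pvBitCast (n : Int) (ic : Int × Char) :
    (1 : Int) <<< (n - ic.1 - 1).toNat = ((pvBit n ic : Nat) : Int) := by
  simp [pvBit]

theorem pvBorCast (a : Nat) (n : Int) (ic : Int × Char) :
    PySem.Int.bor (a : Int) ((1 : Int) <<< (n - ic.1 - 1).toNat) = ((a ||| pvBit n ic : Nat) : Int) := by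
  rw [pvBitCast, PySem.Int.bor_natCast]

theorem pvMapCast (r : List Nat) (n : Int) (ic : Int × Char) :
    (pvCast r).map (fun x => PySem.Int.bor x ((1 : Int) <<< (n - ic.1 - 1).toNat))
      = pvCast (r.map (fun x => x ||| pvBit n ic)) := by
  unfold pvCast
  rw [List.map_map, List.map_map]
  refine List.map_congr_left fun a _ => ?_
  exact pvBorCast a n ic

theorem pvStepA_cast (n : Int) (r : List Nat) (ic : Int × Char) :
    pvStepAI n (pvCast r) ic = pvCast (pvStepA n r ic) := by
  unfold pvStepAI pvStepA
  by_cases h0 : ic.2 = '0'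
  · rw [if_pos h0, if_pos h0]
  · by_cases h1 : ic.2 = '1'
    · rw [if_neg h0, if_neg h0, if_pos h1, if_pos h1, pvMapCast]
    · rw [if_neg h0, if_neg h0, if_neg h1, if_neg h1, pvMapCast]
      unfold pvCast
      rw [List.map_append]

theorem pvFoldA_cast (n : Int) (l : List (Int × Char)) (r : List Nat) :
    l.foldl (pvStepAI n) (pvCast r) = pvCast (l.foldl (pvStepA n) r) := by
  induction l generalizing r with
  | nil => rfl
  | cons p t ih => rw [List.foldl_cons, List.foldl_cons, pvStepA_cast, ih]

theorem gen_all_eq (num : String) :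
    gen_all num
      = pvCast ((PySem.List.enumerate num.toList).foldl (pvStepA (num.toList.length : Int)) [0]) := by
  have h : gen_all num
      = (PySem.List.enumerate num.toList).foldl (pvStepAI (num.toList.length : Int)) [(0 : Int)] := rfl
  rw [h, show ([(0 : Int)] : List Int) = pvCast [0] from rfl, pvFoldA_cast]

theorem pvBase_cast (n : Int) (l : List (Int × Char)) (b : Nat) :
    l.foldl (pvStepBaseI n) ((b : Nat) : Int) = ((l.foldl (pvStepBase n) b : Nat) : Int) := by
  induction l generalizing b with
  | nil => rfl
  | cons p t ih =>
    rw [List.foldl_cons, List.foldl_cons]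
    by_cases h1 : p.2 = '1'
    · rw [show pvStepBaseI n ((b : Nat) : Int) p = ((b ||| pvBit n p : Nat) : Int) by
          unfold pvStepBaseI; rw [if_pos h1]; exact pvBorCast b n p,
        show pvStepBase n b p = b ||| pvBit n p by unfold pvStepBase; rw [if_pos h1], ih]
    · rw [show pvStepBaseI n ((b : Nat) : Int) p = ((b : Nat) : Int) by
          unfold pvStepBaseI; rw [if_neg h1],
        show pvStepBase n b p = b by unfold pvStepBase; rw [if_neg h1], ih]

theorem pvWilds_cast (n : Int) (l : List (Int × Char)) :
    l.filterMap (fun ic => if ic.2 = '0' ∨ ic.2 = '1' then none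
        else some ((1 : Int) <<< (n - ic.1 - 1).toNat))
      = pvCast (pvWilds n l) := by
  induction l with
  | nil => rfl
  | cons p t ih =>
    rw [List.filterMap_cons, pvWilds, List.filterMap_cons]
    by_cases h : p.2 = '0' ∨ p.2 = '1'
    · rw [if_pos h, if_pos h]
      exact ih
    · rw [if_neg h, if_neg h]
      show ((1 : Int) <<< (n - p.1 - 1).toNat) :: _ = pvCast (pvBit n p :: pvWilds n t)
      rw [show pvCast (pvBit n p :: pvWilds n t)
            = ((pvBit n p : Nat) : Int) :: pvCast (pvWilds n t) from rfl, pvBitCast]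
      exact congrArg _ ih

theorem pvDouble_cast (r : List Nat) (w : Nat) :
    pvDoubleI (pvCast r) ((w : Nat) : Int) = pvCast (pvDouble r w) := by
  unfold pvDoubleI pvDouble pvCast
  rw [List.map_append, List.map_map, List.map_map]
  congr 1

theorem pvFoldD_cast (ws : List Nat) (r : List Nat) :
    (pvCast ws).foldl pvDoubleI (pvCast r) = pvCast (ws.foldl pvDouble r) := by
  induction ws generalizing r with
  | nil => rfl
  | cons w t ih =>
    rw [show pvCast (w :: t) = ((w : Nat) : Int) :: pvCast t from rfl,
      List.foldl_cons, List.foldl_cons, pvDouble_cast, ih]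

theorem gen_all_alt_eq (num : String) :
    gen_all_alt num
      = pvCast ((pvWilds (num.toList.length : Int) (PySem.List.enumerate num.toList)).foldl pvDouble
          [pvBase (num.toList.length : Int) (PySem.List.enumerate num.toList)]) := by
  have h : gen_all_alt num
      = ((PySem.List.enumerate num.toList).filterMap
          (fun ic => if ic.2 = '0' ∨ ic.2 = '1' then none
            else some ((1 : Int) <<< ((num.toList.length : Int) - ic.1 - 1).toNat))).foldl pvDoubleI
          [(PySem.List.enumerate num.toList).foldl (pvStepBaseI (num.toList.length : Int)) (0 : Int)] := rfl
  have hb := pvBase_cast (num.toList.length : Int) (PySem.List.enumerate num.toList) 0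
  rw [Nat.cast_zero] at hb
  rw [h, pvWilds_cast, hb,
    show [((((PySem.List.enumerate num.toList).foldl
          (pvStepBase (num.toList.length : Int)) 0 : Nat)) : Int)]
      = pvCast [pvBase (num.toList.length : Int) (PySem.List.enumerate num.toList)] from rfl,
    pvFoldD_cast]

-- The Nat-level equivalence.
theorem pvBase_shift (n : Int) (l : List (Int × Char)) (b : Nat) :
    l.foldl (pvStepBase n) b = b ||| pvBase n l := by
  induction l generalizing b with
  | nil => simp [pvBase]
  | cons p t ih =>
    rw [List.foldl_cons, ih, show pvBase n (p :: t) = pvStepBase n 0 p ||| pvBase n t by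
      rw [pvBase, List.foldl_cons, ih]]
    unfold pvStepBase
    by_cases h1 : p.2 = '1'
    · rw [if_pos h1, if_pos h1, Nat.zero_or]
      ac_rfl
    · rw [if_neg h1, if_neg h1, Nat.zero_or]

theorem pvBase_cons (n : Int) (p : Int × Char) (t : List (Int × Char)) :
    pvBase n (p :: t) = pvStepBase n 0 p ||| pvBase n t := by
  rw [pvBase, List.foldl_cons, pvBase_shift]

theorem pvDouble_map (r : List Nat) (b m : Nat) :
    (pvDouble r b).map (fun x => x ||| m) = pvDouble (r.map (fun x => x ||| m)) b := by
  unfold pvDouble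
  rw [List.map_append, List.map_map, List.map_map]
  congr 1
  refine List.map_congr_left fun a _ => ?_
  show a ||| b ||| m = a ||| m ||| b
  ac_rfl

theorem pvMain (n : Int) (l : List (Int × Char)) (ret : List Nat) :
    l.foldl (pvStepA n) ret
      = (pvWilds n l).foldl pvDouble (ret.map (fun x => x ||| pvBase n l)) := by
  induction l generalizing ret with
  | nil => simp [pvWilds, pvBase, Nat.or_zero]
  | cons p t ih =>
    rw [List.foldl_cons]
    by_cases h0 : p.2 = '0'
    · have hw : pvWilds n (p :: t) = pvWilds n t := by
        unfold pvWilds; rw [List.filterMap_cons, if_pos (Or.inl h0)]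
      have hb : pvBase n (p :: t) = pvBase n t := by
        rw [pvBase_cons]
        unfold pvStepBase
        rw [if_neg (by rw [h0]; decide), Nat.zero_or]
      rw [show pvStepA n ret p = ret by unfold pvStepA; rw [if_pos h0], ih, hw, hb]
    · by_cases h1 : p.2 = '1'
      · have hw : pvWilds n (p :: t) = pvWilds n t := by
          unfold pvWilds; rw [List.filterMap_cons, if_pos (Or.inr h1)]
        have hb : pvBase n (p :: t) = pvBit n p ||| pvBase n t := by
          rw [pvBase_cons]
          unfold pvStepBase
          rw [if_pos h1, Nat.zero_or]
        rw [show pvStepA n ret p = ret.map (fun x => x ||| pvBit n p) by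
            unfold pvStepA; rw [if_neg h0, if_pos h1], ih, hw, hb, List.map_map]
        congr 1
        refine List.map_congr_left fun a _ => ?_
        show a ||| pvBit n p ||| pvBase n t = a ||| (pvBit n p ||| pvBase n t)
        ac_rfl
      · have hw : pvWilds n (p :: t) = pvBit n p :: pvWilds n t := by
          unfold pvWilds
          rw [List.filterMap_cons, if_neg (by simp [h0, h1])]
        have hb : pvBase n (p :: t) = pvBase n t := by
          rw [pvBase_cons]
          unfold pvStepBase
          rw [if_neg h1, Nat.zero_or]
        rw [show pvStepA n ret p = pvDouble ret (pvBit n p) by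
            unfold pvStepA pvDouble; rw [if_neg h0, if_neg h1], ih, hw, hb,
          List.foldl_cons, pvDouble_map]

-- ===== VERDICT (by name: the statement is the Claim_ definition above) =====
theorem gen_all_spec : Claim_equal_gen_all := by
  intro num _
  unfold Spec_gen_all
  rw [gen_all_eq, gen_all_alt_eq, pvMain]
  simp [Nat.zero_or]
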